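-- pv_equiv track=rewrite | github.com/karel-brinda/tp-zpevnik | tpcb/chords.py | transposition_tone
-- ===== SOURCE A (Python) =====
-- tone_normalization={
--     "Cb" : "H",
--     "C"  : "C",
--     "C#" : "C#",
--     "Db" : "C#",
--     "D"  : "D",
--     "D#" : "D#",
--     "Eb" : "D#",
--     "E"  : "E",
--     "Fb" : "E",
--     "E#" : "F",
--     "F"  : "F",
--     "F#" : "F#",
--     "Gb" : "F#",
--     "G"  : "G",
--     "G#" : "G#",
--     "Ab" : "G#",
--     "A"  : "A",
--     "A#" : "B",
--     "Bb" : "B",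
--     "B"  : "B",
--     "B#" : "C",
--     "Hb" : "B",
--     "H"  : "H",
--     "H#" : "C",
-- }
--
-- def transposition_tone(tone,shift):
--     semitones=["C","C#","D","D#","E","F","F#","G","G#","A","B","H"]
--     dict_shifts=dict(
--         [ [semitones[i],semitones[(i+shift) % len(semitones)]] for i in range(len(semitones)) ] +
--         [ ["",""] ]
--     )
--     normalized_tone=tone_normalization[tone]
--     return dict_shifts[normalized_tone]
-- ===== SOURCE B (Python) =====
-- tone_normalization={
--     "Cb" : "H",
--     "C"  : "C",
--     "C#" : "C#",
--     "Db" : "C#",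
--     "D"  : "D",
--     "D#" : "D#",
--     "Eb" : "D#",
--     "E"  : "E",
--     "Fb" : "E",
--     "E#" : "F",
--     "F"  : "F",
--     "F#" : "F#",
--     "Gb" : "F#",
--     "G"  : "G",
--     "G#" : "G#",
--     "Ab" : "G#",
--     "A"  : "A",
--     "A#" : "B",
--     "Bb" : "B",
--     "B"  : "B",
--     "B#" : "C",
--     "Hb" : "B",
--     "H"  : "H",
--     "H#" : "C",
-- }
--
-- _SEMITONES = ["C","C#","D","D#","E","F","F#","G","G#","A","B","H"]
--
-- def transposition_tone(tone, shift):
--     i = _SEMITONES.index(tone_normalization[tone])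
--     return _SEMITONES[(i + shift) % len(_SEMITONES)]
-- ===== Notes on version B (the rewrite author's own statement) =====
-- stated objective: simpler
-- what changed: B drops A's construction of the full 12-entry transposition table (list-comprehension over all semitones turned into a dict) and instead computes only the needed entry: find the normalized tone's index in the semitone list, add the shift mod 12, and read that single position back.
import Mathlib
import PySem

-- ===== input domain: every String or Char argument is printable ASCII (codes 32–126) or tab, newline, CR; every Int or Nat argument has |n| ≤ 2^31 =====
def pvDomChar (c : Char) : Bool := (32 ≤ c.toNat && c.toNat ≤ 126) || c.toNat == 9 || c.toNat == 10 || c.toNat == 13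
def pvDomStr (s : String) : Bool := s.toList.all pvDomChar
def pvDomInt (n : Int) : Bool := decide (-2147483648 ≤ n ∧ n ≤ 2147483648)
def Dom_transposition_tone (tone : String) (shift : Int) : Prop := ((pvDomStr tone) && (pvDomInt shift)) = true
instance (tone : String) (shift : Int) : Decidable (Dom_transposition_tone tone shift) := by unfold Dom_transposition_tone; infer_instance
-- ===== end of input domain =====

-- B replaces A's full 12-entry transposition-table build with a direct index + mod + read-back (simpler).

-- module-level constant shared by A and B (the Python module's tone_normalization dict)
def toneNormalization : PySem.Dict String String := PySem.Dict.ofList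
  [("Cb","H"),("C","C"),("C#","C#"),("Db","C#"),("D","D"),("D#","D#"),("Eb","D#"),
   ("E","E"),("Fb","E"),("E#","F"),("F","F"),("F#","F#"),("Gb","F#"),("G","G"),
   ("G#","G#"),("Ab","G#"),("A","A"),("A#","B"),("Bb","B"),("B","B"),("B#","C"),
   ("Hb","B"),("H","H"),("H#","C")]

-- ===== PORT A =====
def transposition_tone (tone : String) (shift : Int) : String :=
  let semitones : List String := ["C","C#","D","D#","E","F","F#","G","G#","A","B","H"]
  let n : Int := (semitones.length : Int)
  let dict_shifts : PySem.Dict String String :=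
    PySem.Dict.ofList
      (((PySem.List.pyRange 0 n 1).map (fun i =>
          (PySem.List.pyGetD semitones i "",
           PySem.List.pyGetD semitones (PySem.Int.mod (i + shift) n) ""))) ++ [("","")])
  let normalized := (toneNormalization.get? tone).getD ""   -- KeyError (none) excluded by Pre_
  (dict_shifts.get? normalized).getD ""                     -- "" keys never miss under Pre_

-- ===== PORT B =====
def transposition_tone_alt (tone : String) (shift : Int) : String :=
  let semitones : List String := ["C","C#","D","D#","E","F","F#","G","G#","A","B","H"]
  let i : Int := (((PySem.List.index? semitones ((toneNormalization.get? tone).getD "")).getD 0 : Nat) : Int)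
  PySem.List.pyGetD semitones (PySem.Int.mod (i + shift) (semitones.length : Int)) ""

-- ===== PRECONDITION & SPEC =====
-- Pre_ excludes tones absent from tone_normalization, on which A (and B) raise KeyError.
def Pre_transposition_tone (tone : String) (shift : Int) : Prop :=
  tone ∈ ["Cb","C","C#","Db","D","D#","Eb","E","Fb","E#","F","F#","Gb","G","G#","Ab",
          "A","A#","Bb","B","B#","Hb","H","H#"]
instance (tone : String) (shift : Int) : Decidable (Pre_transposition_tone tone shift) := by
  unfold Pre_transposition_tone; infer_instance

def pvWitness_transposition_tone : String × Int := ("Bb", -3)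

def Spec_transposition_tone (tone : String) (shift : Int) (out : String) : Prop := out = transposition_tone_alt tone shift
instance (tone : String) (shift : Int) (out : String) : Decidable (Spec_transposition_tone tone shift out) := by unfold Spec_transposition_tone; infer_instance

-- ===== CLAIM (what is proved, stated in full; the proofs are below) =====
def Claim_equal_transposition_tone : Prop := ∀ (tone : String) (shift : Int), Dom_transposition_tone tone shift → Pre_transposition_tone tone shift → Spec_transposition_tone tone shift (transposition_tone tone shift)

-- ===== LEMMAS AND PROOFS =====

theorem pv_A_mod (tone : String) (shift : Int) :
    transposition_tone tone shift = transposition_tone tone (PySem.Int.mod shift 12) := by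
  unfold transposition_tone
  simp only [List.length_cons, List.length_nil]
  norm_num

theorem pv_B_mod (tone : String) (shift : Int) :
    transposition_tone_alt tone shift = transposition_tone_alt tone (PySem.Int.mod shift 12) := by
  unfold transposition_tone_alt
  simp only [List.length_cons, List.length_nil]
  norm_num

-- ===== VERDICT (by name: the statement is the Claim_ definition above) =====
theorem transposition_tone_spec : Claim_equal_transposition_tone := by
  intro tone shift _ hpre
  unfold Spec_transposition_tone
  rw [pv_A_mod, pv_B_mod]
  have h0 : 0 ≤ PySem.Int.mod shift 12 := PySem.Int.mod_nonneg shift (by norm_num : (0:Int) < 12)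
  have h12 : PySem.Int.mod shift 12 < 12 := PySem.Int.mod_lt shift (by norm_num : (0:Int) < 12)
  set m := PySem.Int.mod shift 12 with hm
  clear_value m
  unfold Pre_transposition_tone at hpre
  interval_cases m <;> fin_cases hpre <;> decide
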